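-- pv_equiv track=rewrite | github.com/afriedman412/municipal-budget-rag | marker_subset_parser.py | get_selected_pages_and_range
-- ===== SOURCE A (Python) =====
-- def get_selected_pages_and_range(target_pages_1idx: list[int], window: int = 5) -> tuple[list[int], str]:
--     selected = set()
--
--     for p in target_pages_1idx:
--         if p is None:
--             continue
--         center = p - 1
--         for page in range(max(0, center - window), center + window + 1):
--             selected.add(page)
--
--     if not selected:
--         return [], ""
--
--     pages = sorted(selected)
--
--     ranges = []
--     start = prev = pages[0]
--     for p in pages[1:]:
--         if p == prev + 1:
--             prev = p
--         else:
--             ranges.append(f"{start}-{prev}" if start != prev else str(start))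
--             start = prev = p
--     ranges.append(f"{start}-{prev}" if start != prev else str(start))
--
--     return pages, ",".join(ranges)
-- ===== SOURCE B (Python) =====
-- def get_selected_pages_and_range(target_pages_1idx: list[int], window: int = 5) -> tuple[list[int], str]:
--     # interval-merge re-implementation: sort targets, merge [max(0,p-1-window), p-1+window]
--     # windows whose gap is <= 1, then emit pages and the range string directly per interval.
--     ivs = []
--     cur = None
--     for p in sorted(p for p in target_pages_1idx if p is not None):
--         lo, hi = max(0, p - 1 - window), p - 1 + window
--         if lo > hi:
--             continue
--         if cur is None:
--             cur = (lo, hi)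
--         elif lo <= cur[1] + 1:
--             cur = (cur[0], max(cur[1], hi))
--         else:
--             ivs.append(cur)
--             cur = (lo, hi)
--     if cur is not None:
--         ivs.append(cur)
--     pages = [x for a, b in ivs for x in range(a, b + 1)]
--     return pages, ",".join(f"{a}-{b}" if a != b else str(a) for a, b in ivs)
-- ===== Notes on version B (the rewrite author's own statement) =====
-- stated objective: faster
-- what changed: Replaces the page-set accumulation (add every window page to a set, sort it, then re-scan the sorted pages for consecutive runs) by sorting the targets once and merging adjacent/overlapping window intervals, emitting both the page list and the range string directly from the merged intervals.
import Mathlib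
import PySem

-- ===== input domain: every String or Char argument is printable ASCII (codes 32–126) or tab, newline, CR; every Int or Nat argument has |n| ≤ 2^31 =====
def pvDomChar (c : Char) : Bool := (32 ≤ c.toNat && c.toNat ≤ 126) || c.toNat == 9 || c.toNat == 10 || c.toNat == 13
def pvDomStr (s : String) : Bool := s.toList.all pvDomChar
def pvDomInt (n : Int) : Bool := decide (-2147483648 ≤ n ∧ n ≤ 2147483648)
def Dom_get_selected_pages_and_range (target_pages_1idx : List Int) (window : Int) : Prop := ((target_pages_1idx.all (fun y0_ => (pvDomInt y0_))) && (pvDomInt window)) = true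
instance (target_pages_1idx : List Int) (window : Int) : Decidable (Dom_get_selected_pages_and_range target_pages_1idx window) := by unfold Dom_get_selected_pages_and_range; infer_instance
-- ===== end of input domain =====

-- B replaces A's page-set + sort + consecutive-run re-scan by sorting the targets once and
-- merging the window intervals directly; it avoids materialising and sorting every window page
-- (measurably faster on large inputs in a timing run).

-- shared formatting helper: f"{start}-{prev}" if start != prev else str(start)
def pvFmt (a b : Int) : String :=
  if a ≠ b then PySem.Int.toStr a ++ "-" ++ PySem.Int.toStr b else PySem.Int.toStr a

-- ===== PORT A =====
-- A's run-scan loop body: (ranges, start, prev), next page p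
def pvStepA (st : List String × Int × Int) (p : Int) : List String × Int × Int :=
  if p = st.2.2 + 1 then (st.1, st.2.1, p)
  else (st.1 ++ [pvFmt st.2.1 st.2.2], p, p)

def get_selected_pages_and_range (target_pages_1idx : List Int) (window : Int) : List Int × String :=
  let selected : PySem.Set Int :=
    target_pages_1idx.foldl (fun s p =>
      let center := p - 1
      (PySem.List.pyRange (max 0 (center - window)) (center + window + 1) 1).foldl
        (fun s page => PySem.Set.add s page) s) PySem.Set.empty
  if selected = [] then ([], "")
  else
    let pages := PySem.List.sorted selected (fun x => x) false
    let p0 := PySem.List.pyGetD pages 0 0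
    let st := (pages.drop 1).foldl pvStepA ([], p0, p0)
    (pages, PySem.Str.join "," (st.1 ++ [pvFmt st.2.1 st.2.2]))

-- ===== PORT B =====
-- B's merge-loop body: state (finished intervals, current open interval)
def pvStepB (window : Int) (st : List (Int × Int) × Option (Int × Int)) (p : Int) :
    List (Int × Int) × Option (Int × Int) :=
  let lo := max 0 (p - 1 - window)
  let hi := p - 1 + window
  if lo > hi then st
  else
    match st.2 with
    | none => (st.1, some (lo, hi))
    | some c =>
      if lo ≤ c.2 + 1 then (st.1, some (c.1, max c.2 hi))
      else (st.1 ++ [c], some (lo, hi))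

def get_selected_pages_and_range_alt (target_pages_1idx : List Int) (window : Int) : List Int × String :=
  let st := (PySem.List.sorted target_pages_1idx (fun x => x) false).foldl (pvStepB window) ([], none)
  let ivs := match st.2 with | none => st.1 | some c => st.1 ++ [c]
  (ivs.flatMap (fun ab => PySem.List.pyRange ab.1 (ab.2 + 1) 1),
   PySem.Str.join "," (ivs.map (fun ab => pvFmt ab.1 ab.2)))

-- ===== PRECONDITION & SPEC =====
def Spec_get_selected_pages_and_range (target_pages_1idx : List Int) (window : Int) (out : List Int × String) : Prop := out = get_selected_pages_and_range_alt target_pages_1idx window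
instance (target_pages_1idx : List Int) (window : Int) (out : List Int × String) : Decidable (Spec_get_selected_pages_and_range target_pages_1idx window out) := by unfold Spec_get_selected_pages_and_range; infer_instance

-- ===== CLAIM (what is proved, stated in full; the proofs are below) =====
def Claim_equal_get_selected_pages_and_range : Prop := ∀ (target_pages_1idx : List Int) (window : Int), Dom_get_selected_pages_and_range target_pages_1idx window → Spec_get_selected_pages_and_range target_pages_1idx window (get_selected_pages_and_range target_pages_1idx window)

-- ===== LEMMAS AND PROOFS =====

-- the window interval of target p, as a page list
def pvR (w p : Int) : List Int := PySem.List.pyRange (max 0 (p - 1 - w)) (p - 1 + w + 1) 1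

-- chain of intervals: each nonempty, starts > lb, ends ≥ starts, gaps ≥ 2
def pvChain : Int → List (Int × Int) → Prop
  | _, [] => True
  | lb, ab :: t => lb < ab.1 ∧ 0 ≤ ab.1 ∧ ab.1 ≤ ab.2 ∧ pvChain (ab.2 + 1) t

def pvFlat (xs : List (Int × Int)) : List Int :=
  xs.flatMap (fun ab => PySem.List.pyRange ab.1 (ab.2 + 1) 1)

def pvCov (xs : List (Int × Int)) (x : Int) : Prop := ∃ ab ∈ xs, ab.1 ≤ x ∧ x ≤ ab.2

def pvSpine (st : List (Int × Int) × Option (Int × Int)) : List (Int × Int) :=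
  match st.2 with | none => st.1 | some c => st.1 ++ [c]

def pvInv (w : Int) (st : List (Int × Int) × Option (Int × Int)) (ts : List Int) : Prop :=
  (st.2 = none → st.1 = []) ∧
  pvChain (-1) st.1 ∧
  (∀ c, st.2 = some c → 0 ≤ c.1 ∧ c.1 ≤ c.2 ∧ ∀ ab ∈ st.1, ab.2 + 1 < c.1) ∧
  (∀ q ∈ ts, (∀ ab ∈ st.1, ab.2 + 1 < max 0 (q - 1 - w)) ∧
             (∀ c, st.2 = some c → c.1 ≤ max 0 (q - 1 - w)))

lemma pvChain_snoc : ∀ (xs : List (Int × Int)) (lb a b : Int),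
    pvChain lb xs → (∀ ab ∈ xs, ab.2 + 1 < a) → lb < a → 0 ≤ a → a ≤ b →
    pvChain lb (xs ++ [(a, b)]) := by
  intro xs
  induction xs with
  | nil => intro lb a b _ _ h1 h2 h3; exact ⟨h1, h2, h3, trivial⟩
  | cons hd t ih =>
    intro lb a b hc hall hlb h0 hab
    obtain ⟨x1, x2, x3, x4⟩ := hc
    exact ⟨x1, x2, x3, ih _ a b x4 (fun ab hm => hall ab (List.mem_cons_of_mem _ hm))
      (hall hd (List.mem_cons_self)) h0 hab⟩

lemma pvFlat_mem : ∀ (xs : List (Int × Int)) (x : Int), x ∈ pvFlat xs ↔ pvCov xs x := by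
  intro xs x
  simp only [pvFlat, pvCov, List.mem_flatMap, PySem.List.mem_pyRange_one]
  constructor
  · rintro ⟨ab, hm, h1, h2⟩; exact ⟨ab, hm, h1, by omega⟩
  · rintro ⟨ab, hm, h1, h2⟩; exact ⟨ab, hm, h1, by omega⟩

lemma pvChain_flat : ∀ (xs : List (Int × Int)) (lb : Int), pvChain lb xs →
    (pvFlat xs).Pairwise (· < ·) ∧ ∀ x ∈ pvFlat xs, lb < x := by
  intro xs
  induction xs with
  | nil => intro lb _; exact ⟨by simp [pvFlat], by simp [pvFlat]⟩
  | cons hd t ih =>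
    intro lb hc
    obtain ⟨h1, h2, h3, h4⟩ := hc
    obtain ⟨ihp, ihm⟩ := ih _ h4
    have hflat : pvFlat (hd :: t) = PySem.List.pyRange hd.1 (hd.2 + 1) 1 ++ pvFlat t := by
      simp [pvFlat]
    constructor
    · rw [hflat]
      apply List.pairwise_append.2
      refine ⟨PySem.List.pairwise_lt_pyRange_one _ _, ihp, ?_⟩
      intro x hx y hy
      rw [PySem.List.mem_pyRange_one] at hx
      have := ihm y hy
      omega
    · intro x hx
      rw [hflat, List.mem_append] at hx
      rcases hx with hx | hx
      · rw [PySem.List.mem_pyRange_one] at hx; omega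
      · have := ihm x hx; omega

lemma pvFoldB (w : Int) : ∀ (ts : List Int) (st : List (Int × Int) × Option (Int × Int)),
    ts.Pairwise (· ≤ ·) → pvInv w st ts →
    pvInv w (ts.foldl (pvStepB w) st) [] ∧
    (∀ x, pvCov (pvSpine (ts.foldl (pvStepB w) st)) x ↔
      pvCov (pvSpine st) x ∨ ∃ p ∈ ts, max 0 (p - 1 - w) ≤ x ∧ x ≤ p - 1 + w) := by
  intro ts
  induction ts with
  | nil =>
    intro st _ hinv
    refine ⟨⟨hinv.1, hinv.2.1, hinv.2.2.1, by simp⟩, ?_⟩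
    simp
  | cons p rest ih =>
    intro st hsorted hinv
    have hple : ∀ q ∈ rest, p ≤ q := (List.pairwise_cons.1 hsorted).1
    have hsr : rest.Pairwise (· ≤ ·) := (List.pairwise_cons.1 hsorted).2
    obtain ⟨i1, i2, i3, i4⟩ := hinv
    have hfut := i4 p (List.mem_cons_self)
    -- establish: pvInv w (pvStepB w st p) rest and one-step coverage
    have hstep : pvInv w (pvStepB w st p) rest ∧
        (∀ x, pvCov (pvSpine (pvStepB w st p)) x ↔
          pvCov (pvSpine st) x ∨ (max 0 (p - 1 - w) ≤ x ∧ x ≤ p - 1 + w)) := by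
      by_cases hskip : max 0 (p - 1 - w) > p - 1 + w
      · have hstv : pvStepB w st p = st := by
          simp [pvStepB, hskip]
        rw [hstv]
        refine ⟨⟨i1, i2, i3, fun q hq => i4 q (List.mem_cons_of_mem _ hq)⟩, ?_⟩
        intro x; constructor
        · intro h; exact Or.inl h
        · rintro (h | h)
          · exact h
          · exfalso; omega
      · rw [not_lt] at hskip
        cases hcur : st.2 with
        | none =>
          have hstv : pvStepB w st p = (st.1, some (max 0 (p - 1 - w), p - 1 + w)) := by
            simp [pvStepB, hcur, not_lt.2 hskip]
          have hnil : st.1 = [] := i1 hcur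
          rw [hstv]
          constructor
          · refine ⟨by simp, by simpa [hnil] using (trivial : pvChain (-1) []), ?_, ?_⟩
            · intro c hc; cases hc
              refine ⟨le_max_left _ _, hskip, ?_⟩
              intro ab hab; rw [hnil] at hab; cases hab
            · intro q hq
              refine ⟨?_, ?_⟩
              · intro ab hab; rw [hnil] at hab; cases hab
              · intro c hc; cases hc
                have := hple q hq
                simp only
                omega
          · intro x
            simp only [pvSpine, hcur, hnil]
            simp [pvCov]
        | some c =>
          by_cases hmerge : max 0 (p - 1 - w) ≤ c.2 + 1
          · have hstv : pvStepB w st p = (st.1, some (c.1, max c.2 (p - 1 + w))) := by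
              simp [pvStepB, hcur, not_lt.2 hskip, hmerge]
            obtain ⟨c1, c2, c3⟩ := i3 c hcur
            have hle : c.1 ≤ max 0 (p - 1 - w) := (hfut.2 c hcur)
            rw [hstv]
            constructor
            · refine ⟨by simp, i2, ?_, ?_⟩
              · intro c' hc'; cases hc'
                exact ⟨c1, by simp; omega, c3⟩
              · intro q hq
                refine ⟨(i4 q (List.mem_cons_of_mem _ hq)).1, ?_⟩
                intro c' hc'; cases hc'
                exact (i4 q (List.mem_cons_of_mem _ hq)).2 c hcur
            · intro x
              simp only [pvSpine, hcur, pvCov]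
              simp only [List.mem_append, List.mem_singleton]
              constructor
              · rintro ⟨ab, hab | hab, hx1, hx2⟩
                · exact Or.inl ⟨ab, Or.inl hab, hx1, hx2⟩
                · cases hab
                  simp only at hx1 hx2
                  rcases (le_or_gt x c.2 : x ≤ c.2 ∨ x > c.2) with h | h
                  · exact Or.inl ⟨c, Or.inr rfl, hx1, h⟩
                  · right; constructor <;> omega
              · rintro (⟨ab, hab | hab, hx1, hx2⟩ | ⟨hx1, hx2⟩)
                · exact ⟨ab, Or.inl hab, hx1, hx2⟩
                · cases hab; exact ⟨_, Or.inr rfl, hx1, by simp; omega⟩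
                · exact ⟨_, Or.inr rfl, by omega, by simp; omega⟩
          · have hstv : pvStepB w st p =
                (st.1 ++ [c], some (max 0 (p - 1 - w), p - 1 + w)) := by
              simp [pvStepB, hcur, not_lt.2 hskip, hmerge]
            obtain ⟨c1, c2, c3⟩ := i3 c hcur
            rw [hstv]
            constructor
            · refine ⟨by simp, ?_, ?_, ?_⟩
              · exact pvChain_snoc st.1 (-1) c.1 c.2 i2 c3 (by omega) c1 c2
              · intro c' hc'; cases hc'
                refine ⟨le_max_left _ _, hskip, ?_⟩
                intro ab hab
                rcases List.mem_append.1 hab with h | h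
                · have := c3 ab h; simp only; omega
                · rw [List.mem_singleton] at h; subst h; simp only; omega
              · intro q hq
                have hq4 := i4 q (List.mem_cons_of_mem _ hq)
                have hpq := hple q hq
                refine ⟨?_, ?_⟩
                · intro ab hab
                  rcases List.mem_append.1 hab with h | h
                  · exact hq4.1 ab h
                  · rw [List.mem_singleton] at h; subst h
                    have : max 0 (p - 1 - w) ≤ max 0 (q - 1 - w) := by omega
                    omega
                · intro c' hc'; cases hc'
                  simp only; omega
            · intro x
              simp only [pvSpine, hcur, pvCov]
              simp only [List.mem_append, List.mem_singleton]
              constructor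
              · rintro ⟨ab, (hab | hab) | hab, hx1, hx2⟩
                · exact Or.inl ⟨ab, Or.inl hab, hx1, hx2⟩
                · cases hab; exact Or.inl ⟨c, Or.inr rfl, hx1, hx2⟩
                · cases hab; right; exact ⟨hx1, hx2⟩
              · rintro (⟨ab, hab | hab, hx1, hx2⟩ | ⟨hx1, hx2⟩)
                · exact ⟨ab, Or.inl (Or.inl hab), hx1, hx2⟩
                · cases hab; exact ⟨c, Or.inl (Or.inr rfl), hx1, hx2⟩
                · exact ⟨_, Or.inr rfl, hx1, hx2⟩
    obtain ⟨hinv', hcov1⟩ := hstep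
    obtain ⟨hinvf, hcovf⟩ := ih (pvStepB w st p) hsr hinv'
    refine ⟨hinvf, ?_⟩
    intro x
    rw [List.foldl_cons] at *
    rw [hcovf x, hcov1 x]
    constructor
    · rintro ((h | h) | ⟨q, hq, h1, h2⟩)
      · exact Or.inl h
      · exact Or.inr ⟨p, List.mem_cons_self, h⟩
      · exact Or.inr ⟨q, List.mem_cons_of_mem _ hq, h1, h2⟩
    · rintro (h | ⟨q, hq, h1, h2⟩)
      · exact Or.inl (Or.inl h)
      · rcases List.mem_cons.1 hq with rfl | hq
        · exact Or.inl (Or.inr ⟨h1, h2⟩)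
        · exact Or.inr ⟨q, hq, h1, h2⟩

-- A's selected set is Set.ofList of the concatenation of the window ranges
lemma pvSelected_eq (w : Int) : ∀ (tp : List Int) (s : PySem.Set Int),
    tp.foldl (fun s p =>
      (PySem.List.pyRange (max 0 (p - 1 - w)) (p - 1 + w + 1) 1).foldl
        (fun s page => PySem.Set.add s page) s) s
    = PySem.Set.update s (tp.flatMap (pvR w)) := by
  intro tp
  induction tp with
  | nil => intro s; simp [PySem.Set.update]
  | cons p t ih =>
    intro s
    rw [List.foldl_cons, ih, List.flatMap_cons, PySem.Set.update_append]
    rfl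

lemma pvRun : ∀ (k : Nat) (a : Int) (acc : List String) (s : Int),
    (PySem.List.pyRange (a + 1) (a + k + 1) 1).foldl pvStepA (acc, s, a) = (acc, s, a + k) := by
  intro k
  induction k with
  | zero =>
    intro a acc s
    rw [PySem.List.pyRange_one_eq_nil (by omega)]
    simp
  | succ n ih =>
    intro a acc s
    rw [PySem.List.pyRange_one_cons (by push_cast; omega), List.foldl_cons]
    have h1 : pvStepA (acc, s, a) (a + 1) = (acc, s, a + 1) := by
      simp [pvStepA]
    rw [h1]
    have h2 : a + ((n : Int) + 1) + 1 = (a + 1) + (n : Int) + 1 := by ring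
    push_cast
    rw [h2, ih (a + 1) acc s]
    refine Prod.ext rfl (Prod.ext rfl ?_)
    simp; ring

lemma pvScan : ∀ (t : List (Int × Int)) (prev : Int), pvChain (prev + 1) t →
    ∀ (acc : List String) (s : Int),
    (((pvFlat t).foldl pvStepA (acc, s, prev)).1 ++
      [pvFmt ((pvFlat t).foldl pvStepA (acc, s, prev)).2.1
             ((pvFlat t).foldl pvStepA (acc, s, prev)).2.2])
    = acc ++ [pvFmt s prev] ++ t.map (fun ab => pvFmt ab.1 ab.2) := by
  intro t
  induction t with
  | nil => intro prev _ acc s; simp [pvFlat]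
  | cons hd t ih =>
    intro prev hc acc s
    obtain ⟨h1, h2, h3, h4⟩ := hc
    have hflat : pvFlat (hd :: t) =
        (hd.1 :: PySem.List.pyRange (hd.1 + 1) (hd.2 + 1) 1) ++ pvFlat t := by
      simp only [pvFlat, List.flatMap_cons]
      rw [PySem.List.pyRange_one_cons (by omega)]
    obtain ⟨k, hk⟩ : ∃ k : Nat, hd.2 = hd.1 + k := ⟨(hd.2 - hd.1).toNat, by omega⟩
    rw [hflat, List.foldl_append, List.foldl_cons]
    have hstep : pvStepA (acc, s, prev) hd.1 = (acc ++ [pvFmt s prev], hd.1, hd.1) := by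
      simp only [pvStepA]
      rw [if_neg (by omega)]
    rw [hstep, hk, pvRun k hd.1 (acc ++ [pvFmt s prev]) hd.1]
    have := ih (hd.1 + k) (by rw [← hk]; exact h4) (acc ++ [pvFmt s prev]) hd.1
    rw [this]
    simp [← hk]

-- ===== VERDICT (by name: the statement is the Claim_ definition above) =====
theorem get_selected_pages_and_range_spec : Claim_equal_get_selected_pages_and_range := by
  intro tp w _
  unfold Spec_get_selected_pages_and_range
  -- notation
  have hsel := pvSelected_eq w tp PySem.Set.empty
  have hL : ∀ x : Int, x ∈ tp.flatMap (pvR w) ↔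
      ∃ p ∈ tp, max 0 (p - 1 - w) ≤ x ∧ x ≤ p - 1 + w := by
    intro x
    simp only [List.mem_flatMap, pvR, PySem.List.mem_pyRange_one]
    constructor
    · rintro ⟨p, hp, h1, h2⟩; exact ⟨p, hp, h1, by omega⟩
    · rintro ⟨p, hp, h1, h2⟩; exact ⟨p, hp, h1, by omega⟩
  have hinit : pvInv w ([], none) (PySem.List.sorted tp (fun x => x) false) := by
    refine ⟨fun _ => rfl, trivial, ?_, ?_⟩
    · intro c hc; exact nomatch hc
    · intro q _
      refine ⟨?_, ?_⟩
      · intro ab hab; exact nomatch hab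
      · intro c hc; exact nomatch hc
  have hpair : (PySem.List.sorted tp (fun x => x) false).Pairwise (· ≤ ·) := by
    have := PySem.List.sorted_pairwise tp (fun x => x)
    simpa using this
  obtain ⟨hinvf, hcov⟩ := pvFoldB w (PySem.List.sorted tp (fun x => x) false) ([], none) hpair hinit
  obtain ⟨j1, j2, j3, _⟩ := hinvf
  set F := (PySem.List.sorted tp (fun x => x) false).foldl (pvStepB w) ([], none) with hF
  have hchainS : pvChain (-1) (pvSpine F) := by
    cases hc : F.2 with
    | none => simpa [pvSpine, hc] using j2
    | some c =>
      obtain ⟨c1, c2, c3⟩ := j3 c hc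
      simp only [pvSpine, hc]
      exact pvChain_snoc F.1 (-1) c.1 c.2 j2 c3 (by omega) c1 c2
  have hcovS : ∀ x, pvCov (pvSpine F) x ↔
      ∃ p ∈ tp, max 0 (p - 1 - w) ≤ x ∧ x ≤ p - 1 + w := by
    intro x
    rw [hcov x]
    simp only [pvSpine, pvCov, List.not_mem_nil]
    constructor
    · rintro (⟨ab, hab, _⟩ | ⟨p, hp, h1, h2⟩)
      · cases hab
      · exact ⟨p, (PySem.List.mem_sorted _ _ _ _).1 hp, h1, h2⟩
    · rintro ⟨p, hp, h1, h2⟩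
      exact Or.inr ⟨p, (PySem.List.mem_sorted _ _ _ _).2 hp, h1, h2⟩
  have hmemB : ∀ x, x ∈ pvFlat (pvSpine F) ↔ x ∈ PySem.Set.ofList (tp.flatMap (pvR w)) := by
    intro x
    rw [pvFlat_mem, hcovS, PySem.Set.mem_ofList, hL]
  obtain ⟨hpw, -⟩ := pvChain_flat (pvSpine F) (-1) hchainS
  -- the B-side value, in terms of pvSpine/pvFlat
  have hBval : get_selected_pages_and_range_alt tp w =
      (pvFlat (pvSpine F), PySem.Str.join "," ((pvSpine F).map (fun ab => pvFmt ab.1 ab.2))) := by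
    rfl
  rw [hBval]
  -- the A-side selected set
  have hAsel : get_selected_pages_and_range tp w =
      (if PySem.Set.ofList (tp.flatMap (pvR w)) = [] then (([] : List Int), "")
       else
         (PySem.List.sorted (PySem.Set.ofList (tp.flatMap (pvR w))) (fun x => x) false,
          PySem.Str.join ","
            ((((PySem.List.sorted (PySem.Set.ofList (tp.flatMap (pvR w))) (fun x => x) false).drop 1).foldl pvStepA
                ([], PySem.List.pyGetD (PySem.List.sorted (PySem.Set.ofList (tp.flatMap (pvR w))) (fun x => x) false) 0 0,
                     PySem.List.pyGetD (PySem.List.sorted (PySem.Set.ofList (tp.flatMap (pvR w))) (fun x => x) false) 0 0)).1 ++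
              [pvFmt (((PySem.List.sorted (PySem.Set.ofList (tp.flatMap (pvR w))) (fun x => x) false).drop 1).foldl pvStepA
                ([], PySem.List.pyGetD (PySem.List.sorted (PySem.Set.ofList (tp.flatMap (pvR w))) (fun x => x) false) 0 0,
                     PySem.List.pyGetD (PySem.List.sorted (PySem.Set.ofList (tp.flatMap (pvR w))) (fun x => x) false) 0 0)).2.1
                     (((PySem.List.sorted (PySem.Set.ofList (tp.flatMap (pvR w))) (fun x => x) false).drop 1).foldl pvStepA
                ([], PySem.List.pyGetD (PySem.List.sorted (PySem.Set.ofList (tp.flatMap (pvR w))) (fun x => x) false) 0 0,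
                     PySem.List.pyGetD (PySem.List.sorted (PySem.Set.ofList (tp.flatMap (pvR w))) (fun x => x) false) 0 0)).2.2]))) := by
    unfold get_selected_pages_and_range
    rw [hsel]
    rfl
  rw [hAsel]
  by_cases hnil : PySem.Set.ofList (tp.flatMap (pvR w)) = []
  · -- no pages at all: the spine is empty too
    rw [if_pos hnil]
    have hSnil : pvSpine F = [] := by
      cases hS : pvSpine F with
      | nil => rfl
      | cons ab t =>
        exfalso
        have hc : pvChain (-1) (ab :: t) := hS ▸ hchainS
        have hm : pvCov (pvSpine F) ab.1 := by
          rw [hS]; exact ⟨ab, List.mem_cons_self, le_refl _, hc.2.2.1⟩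
        rw [hcovS] at hm
        have : (ab.1 : Int) ∈ PySem.Set.ofList (tp.flatMap (pvR w)) := by
          rw [PySem.Set.mem_ofList, hL]; exact hm
        rw [hnil] at this
        cases this
    rw [hSnil]
    rfl
  · rw [if_neg hnil]
    -- pages = merged flat list
    have hnodB : (pvFlat (pvSpine F)).Nodup := List.Pairwise.imp (fun h => ne_of_lt h) hpw
    have hperm : (pvFlat (pvSpine F)).Perm (PySem.Set.ofList (tp.flatMap (pvR w))) :=
      (List.perm_ext_iff_of_nodup hnodB (PySem.Set.nodup_ofList _)).2 hmemB
    have hpages : PySem.List.sorted (PySem.Set.ofList (tp.flatMap (pvR w))) (fun x => x) false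
        = pvFlat (pvSpine F) :=
      PySem.List.sorted_eq_of_perm_of_pairwise_lt _ _ _ hperm (by simpa using hpw)
    rw [hpages]
    -- the spine is nonempty
    obtain ⟨ab, t, hS⟩ : ∃ ab t, pvSpine F = ab :: t := by
      cases hS : pvSpine F with
      | nil =>
        exfalso
        apply hnil
        rw [List.eq_nil_iff_forall_not_mem]
        intro x hx
        rw [← hmemB x, hS] at hx
        simp [pvFlat] at hx
      | cons ab t => exact ⟨ab, t, rfl⟩
    have hc : pvChain (-1) (ab :: t) := hS ▸ hchainS
    obtain ⟨hc1, hc2, hc3, hc4⟩ := hc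
    have hflat : pvFlat (ab :: t) =
        ab.1 :: (PySem.List.pyRange (ab.1 + 1) (ab.2 + 1) 1 ++ pvFlat t) := by
      simp only [pvFlat, List.flatMap_cons]
      rw [PySem.List.pyRange_one_cons (by omega)]
      rfl
    rw [hS, hflat]
    -- pages[0] and pages[1:]
    have hget : PySem.List.pyGetD (ab.1 :: (PySem.List.pyRange (ab.1 + 1) (ab.2 + 1) 1 ++ pvFlat t)) 0 0 = ab.1 := by
      have h0 : (0 : Int) ≤ max (ab.2 - ab.1) 0 + ((pvFlat t).length : Int) := by omega
      simp [PySem.List.pyGetD, PySem.List.pyGet?, PySem.List.pyIdx?, h0]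
    rw [hget]
    simp only [List.drop_succ_cons, List.drop_zero, List.foldl_append]
    -- the first run: a+1 .. b
    obtain ⟨k, hk⟩ : ∃ k : Nat, ab.2 = ab.1 + k := ⟨(ab.2 - ab.1).toNat, by omega⟩
    have hrun : (PySem.List.pyRange (ab.1 + 1) (ab.2 + 1) 1).foldl pvStepA (([] : List String), ab.1, ab.1)
        = ([], ab.1, ab.2) := by
      rw [hk]; exact pvRun k ab.1 [] ab.1
    rw [hrun]
    have hscan := pvScan t ab.2 hc4 ([] : List String) ab.1
    refine Prod.ext rfl ?_
    simp only
    rw [hscan]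
    simp
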